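-- pv_equiv track=rewrite | github.com/WatchTurm/WatchTurm-control-room | MVP1/snapshot/selection_onboarding_wizard.py | group_resources_by_pattern
-- ===== SOURCE A (Python) =====
-- from collections import defaultdict
-- from typing import Any, Dict, List, Optional, Set
--
-- def group_resources_by_pattern(resources: List[Dict[str, Any]], key_field: str) -> Dict[str, List[Dict[str, Any]]]:
--     """Group resources by common naming patterns (e.g., project prefixes)."""
--     groups: Dict[str, List[Dict[str, Any]]] = defaultdict(list)
--
--     for resource in resources:
--         name = resource.get(key_field, "").lower()
--         # Try to extract project prefix (e.g., "po1-tap-", "tcbp-mfe-")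
--         parts = name.split("-")
--         if len(parts) >= 2:
--             prefix = f"{parts[0]}-{parts[1]}"
--             groups[prefix].append(resource)
--         else:
--             groups["_other"].append(resource)
--
--     return dict(groups)
-- ===== SOURCE B (Python) =====
-- def group_resources_by_pattern(resources, key_field):
--     """Group resources by common naming patterns (e.g., project prefixes)."""
--     def key(resource):
--         parts = resource.get(key_field, "").lower().split("-")
--         return f"{parts[0]}-{parts[1]}" if len(parts) >= 2 else "_other"
--     prefixes = dict.fromkeys(key(r) for r in resources)
--     return {p: [r for r in resources if key(r) == p] for p in prefixes}
-- ===== Notes on version B (the rewrite author's own statement) =====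
-- stated objective: alternative
-- what changed: Replaces the single accumulate-into-defaultdict pass with computing the distinct prefixes once (dict.fromkeys) and then building each group by a filter scan over the input.
import Mathlib
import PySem

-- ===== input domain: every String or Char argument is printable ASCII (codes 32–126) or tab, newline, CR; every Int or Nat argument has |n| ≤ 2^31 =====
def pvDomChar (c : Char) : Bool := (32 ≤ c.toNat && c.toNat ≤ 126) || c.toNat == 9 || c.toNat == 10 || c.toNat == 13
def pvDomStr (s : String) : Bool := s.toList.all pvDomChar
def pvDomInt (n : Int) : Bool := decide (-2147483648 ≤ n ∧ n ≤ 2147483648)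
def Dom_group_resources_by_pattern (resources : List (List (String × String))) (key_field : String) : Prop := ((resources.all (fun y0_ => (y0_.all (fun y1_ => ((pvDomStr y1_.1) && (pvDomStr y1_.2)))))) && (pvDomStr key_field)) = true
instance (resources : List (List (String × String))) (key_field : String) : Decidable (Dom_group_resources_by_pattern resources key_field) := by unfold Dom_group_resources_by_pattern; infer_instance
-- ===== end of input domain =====

-- B computes the distinct two-part prefixes once and builds each group by filtering,
-- instead of A's accumulate-into-defaultdict pass; same result, objective: alternative.

-- ===== PORT A =====
-- resource.get(key_field, "") on the association list (lookup = first match)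
def pvGetField (r : List (String × String)) (key_field : String) : String :=
  ((r.find? (fun p => p.1 == key_field)).map Prod.snd).getD ""

def group_resources_by_pattern (resources : List (List (String × String))) (key_field : String) : List (String × List (List (String × String))) :=
  (resources.foldl (fun groups resource =>
      let name := PySem.Str.lower (pvGetField resource key_field)
      let parts := (PySem.Str.split? name "-").getD []
      if parts.length ≥ 2 then
        groups.modify (parts.getD 0 "" ++ "-" ++ parts.getD 1 "") [] (· ++ [resource])
      else
        groups.modify "_other" [] (· ++ [resource]))
    (PySem.Dict.empty : PySem.Dict String (List (List (String × String))))).items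

-- ===== PORT B =====
def pvKeyB (key_field : String) (resource : List (String × String)) : String :=
  let parts := (PySem.Str.split? (PySem.Str.lower (pvGetField resource key_field)) "-").getD []
  if parts.length ≥ 2 then parts.getD 0 "" ++ "-" ++ parts.getD 1 "" else "_other"

def group_resources_by_pattern_alt (resources : List (List (String × String))) (key_field : String) : List (String × List (List (String × String))) :=
  (PySem.List.dedup (resources.map (pvKeyB key_field))).map
    (fun p => (p, resources.filter (fun r => pvKeyB key_field r == p)))

-- ===== PRECONDITION & SPEC =====
def Spec_group_resources_by_pattern (resources : List (List (String × String))) (key_field : String) (out : List (String × List (List (String × String)))) : Prop := out = group_resources_by_pattern_alt resources key_field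
instance (resources : List (List (String × String))) (key_field : String) (out : List (String × List (List (String × String)))) : Decidable (Spec_group_resources_by_pattern resources key_field out) := by unfold Spec_group_resources_by_pattern; infer_instance

-- ===== CLAIM (what is proved, stated in full; the proofs are below) =====
def Claim_equal_group_resources_by_pattern : Prop := ∀ (resources : List (List (String × String))) (key_field : String), Dom_group_resources_by_pattern resources key_field → Spec_group_resources_by_pattern resources key_field (group_resources_by_pattern resources key_field)

-- ===== LEMMAS AND PROOFS =====

-- A's loop body applies the same modify under either branch: it is a modify at pvKeyB.
lemma pvBodyEq (key_field : String) (groups : PySem.Dict String (List (List (String × String)))) (resource : List (String × String)) :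
    (let name := PySem.Str.lower (pvGetField resource key_field)
     let parts := (PySem.Str.split? name "-").getD []
     if parts.length ≥ 2 then
       groups.modify (parts.getD 0 "" ++ "-" ++ parts.getD 1 "") [] (· ++ [resource])
     else
       groups.modify "_other" [] (· ++ [resource]))
    = groups.modify (pvKeyB key_field resource) [] (· ++ [resource]) := by
  simp only [pvKeyB]
  split <;> rfl

-- getD of A's grouping loop, stated for our specific body
lemma pvGetDLoop (key_field : String) (l : List (List (String × String))) (c : String) :
    (l.foldl (fun d r => d.modify (pvKeyB key_field r) [] (· ++ [r]))
        (PySem.Dict.empty : PySem.Dict String (List (List (String × String))))).getD c []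
      = l.filter (fun r => pvKeyB key_field r == c) := by
  have h := PySem.Dict.getD_foldl_modify_append
      (l.map (fun r => (pvKeyB key_field r, r)))
      (PySem.Dict.empty : PySem.Dict String (List (List (String × String)))) c
  rw [List.foldl_map] at h
  simpa [List.filter_map, Function.comp_def, List.map_map] using h

-- ===== VERDICT (by name: the statement is the Claim_ definition above) =====
theorem group_resources_by_pattern_spec : Claim_equal_group_resources_by_pattern := by
  intro resources key_field _
  show group_resources_by_pattern resources key_field = group_resources_by_pattern_alt resources key_field
  unfold group_resources_by_pattern group_resources_by_pattern_alt
  simp only [pvBodyEq]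
  have hnd : (resources.foldl (fun d r => d.modify (pvKeyB key_field r) [] (· ++ [r]))
      (PySem.Dict.empty : PySem.Dict String (List (List (String × String))))).keys.Nodup :=
    PySem.Dict.nodup_keys_foldl_modify_key resources (pvKeyB key_field) []
      (fun _ r => (· ++ [r])) PySem.Dict.empty (by simp)
  rw [PySem.Dict.items_eq_map_keys _ hnd []]
  rw [PySem.Dict.keys_foldl_modify_key resources (pvKeyB key_field) [] (fun _ r => (· ++ [r]))]
  simp only [PySem.Dict.keys_empty, PySem.List.dedup_eq_ofList]
  exact List.map_congr_left (fun k _ => by rw [pvGetDLoop])
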